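-- pv_equiv track=rewrite | github.com/Nanosplitter/advent-of-code | 2025/day01/solution.py | part1
-- ===== SOURCE A (Python) =====
-- def part1(rotations: list[tuple[str, int]]) -> int:
--     dial = 50
--
--     count = 0
--
--     for rotation in rotations:
--         if rotation[0] == "R":
--             dial += rotation[1]
--         else:
--             dial -= rotation[1]
--
--         dial %= 100
--
--         if dial == 0:
--             count += 1
--
--     return count
-- ===== SOURCE B (Python) =====
-- def part1(rotations: list[tuple[str, int]]) -> int:
--     def solve(segment, base):
--         # (number of rotations in segment that land the dial on 0 when the
--         #  segment starts with cumulative position `base`, net signed delta)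
--         if not segment:
--             return (0, 0)
--         if len(segment) == 1:
--             d, n = segment[0]
--             delta = n if d == "R" else -n
--             return (int((base + delta) % 100 == 0), delta)
--         mid = len(segment) // 2
--         c1, s1 = solve(segment[:mid], base)
--         c2, s2 = solve(segment[mid:], base + s1)
--         return (c1 + c2, s1 + s2)
--
--     return solve(rotations, 50)[0]
-- ===== Notes on version B (the rewrite author's own statement) =====
-- stated objective: alternative
-- what changed: B replaces A's single stateful left-to-right scan with a divide-and-conquer: each half-segment is solved recursively into a (zero-hit count, net signed delta) pair, and pairs are combined by offsetting the right half's starting base by the left half's delta; correctness rests on mod-100 commuting with addition so a segment's count depends only on its starting base.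
import Mathlib
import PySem

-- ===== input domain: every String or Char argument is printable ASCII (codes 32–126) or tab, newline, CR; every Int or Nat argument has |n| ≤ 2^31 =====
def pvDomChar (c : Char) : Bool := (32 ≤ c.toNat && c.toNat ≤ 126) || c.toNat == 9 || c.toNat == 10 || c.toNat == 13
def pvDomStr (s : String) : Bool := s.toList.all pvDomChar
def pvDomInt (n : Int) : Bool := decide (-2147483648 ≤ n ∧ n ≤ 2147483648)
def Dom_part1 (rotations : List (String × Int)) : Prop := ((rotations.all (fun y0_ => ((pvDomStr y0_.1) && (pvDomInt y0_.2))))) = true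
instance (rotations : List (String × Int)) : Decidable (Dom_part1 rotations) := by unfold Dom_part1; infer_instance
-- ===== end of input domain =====

-- B replaces A's single stateful scan with a divide-and-conquer over segments combining (zero-hit count, net delta) pairs; alternative structure, not faster.


-- ===== PORT A =====
def part1 (rotations : List (String × Int)) : Int :=
  (rotations.foldl
    (fun (s : Int × Int) (rotation : String × Int) =>
      let dial := if rotation.1 == "R" then s.1 + rotation.2 else s.1 - rotation.2
      let dial := PySem.Int.mod dial 100
      (dial, if dial == 0 then s.2 + 1 else s.2))
    (50, 0)).2

-- ===== PORT B =====
-- B helper `solve`: divide and conquer on the segment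
def pvSolve : List (String × Int) → Int → Int × Int
  | [], _ => (0, 0)
  | [r], base =>
    let delta := if r.1 == "R" then r.2 else -r.2
    ((if PySem.Int.mod (base + delta) 100 == 0 then 1 else 0), delta)
  | a :: b :: rest, base =>
    let seg := a :: b :: rest
    let mid := seg.length / 2
    let p1 := pvSolve (seg.take mid) base
    let p2 := pvSolve (seg.drop mid) (base + p1.2)
    (p1.1 + p2.1, p1.2 + p2.2)
termination_by seg _ => seg.length
decreasing_by
  · simp [List.length_take]; omega
  · simp [List.length_drop]; omega

def part1_alt (rotations : List (String × Int)) : Int :=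
  (pvSolve rotations 50).1

-- ===== PRECONDITION & SPEC =====
def Spec_part1 (rotations : List (String × Int)) (out : Int) : Prop := out = part1_alt rotations
instance (rotations : List (String × Int)) (out : Int) : Decidable (Spec_part1 rotations out) := by unfold Spec_part1; infer_instance

-- ===== CLAIM (what is proved, stated in full; the proofs are below) =====
def Claim_equal_part1 : Prop := ∀ (rotations : List (String × Int)), Dom_part1 rotations → Spec_part1 rotations (part1 rotations)

-- ===== LEMMAS AND PROOFS =====

-- reference spec: count of steps landing on a multiple of 100, and net delta
def pvCz (base : Int) : List (String × Int) → Int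
  | [] => 0
  | r :: rs =>
    let d := if r.1 == "R" then r.2 else -r.2
    (if (base + d) % 100 == 0 then 1 else 0) + pvCz (base + d) rs

def pvSd : List (String × Int) → Int
  | [] => 0
  | r :: rs => (if r.1 == "R" then r.2 else -r.2) + pvSd rs

theorem pvSd_append (L R : List (String × Int)) : pvSd (L ++ R) = pvSd L + pvSd R := by
  induction L with
  | nil => simp [pvSd]
  | cons r L ih => simp [pvSd, ih]; ring

theorem pvCz_append (L R : List (String × Int)) : ∀ base,
    pvCz base (L ++ R) = pvCz base L + pvCz (base + pvSd L) R := by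
  induction L with
  | nil => intro base; simp [pvCz, pvSd]
  | cons r L ih =>
    intro base
    simp only [List.cons_append, pvCz, pvSd, ih]
    ring_nf

theorem pvSolve_eq (n : Nat) : ∀ (rs : List (String × Int)), rs.length ≤ n →
    ∀ base, pvSolve rs base = (pvCz base rs, pvSd rs) := by
  induction n with
  | zero =>
    intro rs h base
    have : rs = [] := List.length_eq_zero_iff.mp (Nat.le_antisymm h (Nat.zero_le _))
    subst this
    simp [pvSolve, pvCz, pvSd]
  | succ n ih =>
    intro rs h base
    match rs with
    | [] => simp [pvSolve, pvCz, pvSd]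
    | [r] =>
      by_cases hr : r.1 == "R" <;> simp [pvSolve, pvCz, pvSd, hr]
    | a :: b :: rest =>
      have hlen : (a :: b :: rest).length = rest.length + 2 := by simp
      have hmid : 1 ≤ (a :: b :: rest).length / 2 ∧ (a :: b :: rest).length / 2 < (a :: b :: rest).length := by
        rw [hlen]; omega
      have htake : ((a :: b :: rest).take ((a :: b :: rest).length / 2)).length ≤ n := by
        rw [List.length_take]; simp at h ⊢; omega
      have hdrop : ((a :: b :: rest).drop ((a :: b :: rest).length / 2)).length ≤ n := by
        rw [List.length_drop]; simp at h ⊢; omega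
      rw [pvSolve.eq_def]
      simp only [ih _ htake, ih _ hdrop]
      have hsplit : (a :: b :: rest).take ((a :: b :: rest).length / 2)
          ++ (a :: b :: rest).drop ((a :: b :: rest).length / 2) = a :: b :: rest :=
        List.take_append_drop _ _
      conv_rhs => rw [← hsplit]
      rw [pvCz_append, pvSd_append]

-- A-side invariant: running A's loop from dial = b % 100 adds pvCz b of the suffix
theorem pvA_inv (rs : List (String × Int)) : ∀ (b c : Int),
    (rs.foldl
      (fun (s : Int × Int) (rotation : String × Int) =>
        let dial := if rotation.1 == "R" then s.1 + rotation.2 else s.1 - rotation.2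
        let dial := PySem.Int.mod dial 100
        (dial, if dial == 0 then s.2 + 1 else s.2))
      (b % 100, c)).2 = c + pvCz b rs := by
  induction rs with
  | nil => intro b c; simp [pvCz]
  | cons r rs ih =>
    intro b c
    have hconv : ∀ a : Int, PySem.Int.mod a 100 = a % 100 := fun a =>
      PySem.Int.mod_eq_emod_of_pos (by norm_num)
    have hstep : (if r.1 == "R" then b % 100 + r.2 else b % 100 - r.2)
        = b % 100 + (if r.1 == "R" then r.2 else -r.2) := by
      cases r.1 == "R" <;> simp [sub_eq_add_neg]
    have hmod : (b % 100 + (if r.1 == "R" then r.2 else -r.2)) % 100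
        = (b + (if r.1 == "R" then r.2 else -r.2)) % 100 := by omega
    simp only [hconv] at ih
    simp only [List.foldl_cons, hconv, hstep, hmod, pvCz]
    rw [ih (b + (if r.1 == "R" then r.2 else -r.2))]
    cases hz : ((b + (if r.1 == "R" then r.2 else -r.2)) % 100 == 0) <;> simp <;> omega

theorem part1_spec : Claim_equal_part1 := by
  intro rotations _
  unfold Spec_part1 part1 part1_alt
  rw [pvSolve_eq rotations.length rotations (le_refl _) 50]
  have h := pvA_inv rotations 50 0
  norm_num at h
  simpa using h
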